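-- pv_equiv track=rewrite | github.com/zhizhunbao/ottawa-genai-research-assistant | .skills/dev-pdf_processing/scripts/pdf_to_image_md.py | _format_with_title
-- ===== SOURCE A (Python) =====
-- def _format_with_title(text: str) -> str:
--     """Extract and format title from text content"""
--     if not text or not text.strip():
--         return text
--
--     lines = text.split('\n')
--     if not lines:
--         return text
--
--     # Try to identify the title (first substantial line)
--     title = None
--     remaining_lines = []
--     found_title = False
--
--     for i, line in enumerate(lines):
--         line = line.strip()
--
--         if not found_title and line:
--             # First non-empty line is likely the title
--             # Check if it looks like a title (short, capitalized, no ending punctuation)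
--             if len(line) < 100 and not line.endswith(('.', ',', ';', ':')):
--                 title = line
--                 found_title = True
--                 continue
--
--         if found_title:
--             remaining_lines.append(line)
--
--     # Format output
--     if title:
--         formatted = f"**{title}**\n\n"
--         if remaining_lines:
--             formatted += '\n'.join(remaining_lines)
--         return formatted.strip()
--
--     return text
-- ===== SOURCE B (Python) =====
-- def _format_with_title(text: str) -> str:
--     if not text or not text.strip():
--         return text
--     rest = text
--     while True:
--         j = rest.find('\n')
--         head = rest if j < 0 else rest[:j]
--         line = head.strip()
--         if line and len(line) < 100 and not line.endswith(('.', ',', ';', ':')):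
--             parts = []
--             if j >= 0:
--                 tail = rest[j + 1:]
--                 while True:
--                     k = tail.find('\n')
--                     if k < 0:
--                         parts.append(tail.strip())
--                         break
--                     parts.append(tail[:k].strip())
--                     tail = tail[k + 1:]
--             return ('**' + line + '**\n\n' + '\n'.join(parts)).strip()
--         if j < 0:
--             return text
--         rest = rest[j + 1:]
-- ===== Notes on version B (the rewrite author's own statement) =====
-- stated objective: alternative
-- what changed: B never splits the text into a line list: it walks the raw string with str.find on the newline character and slicing, peeling one line at a time in a scan loop (and a second peel loop for the body), instead of A's single stateful accumulation loop with title/found_title/remaining_lines flags over the split line list.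
import Mathlib
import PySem

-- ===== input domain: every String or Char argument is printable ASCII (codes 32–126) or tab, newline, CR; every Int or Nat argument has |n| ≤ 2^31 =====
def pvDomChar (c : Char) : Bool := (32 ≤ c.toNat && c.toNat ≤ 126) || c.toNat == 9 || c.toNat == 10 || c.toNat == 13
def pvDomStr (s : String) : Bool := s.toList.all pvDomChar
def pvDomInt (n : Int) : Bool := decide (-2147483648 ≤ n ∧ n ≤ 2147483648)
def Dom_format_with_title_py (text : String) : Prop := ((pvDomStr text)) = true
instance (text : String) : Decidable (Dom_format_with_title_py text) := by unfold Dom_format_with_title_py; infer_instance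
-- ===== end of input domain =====

-- B never builds a line list: it peels the raw string one line at a time with find('\n')
-- and slicing, instead of A's stateful flag loop over text.split('\n'); objective: alternative.

-- ===== PORT A =====
-- A's for-loop over lines with state (title, remaining_lines, found_title)
def aLoop : List String → Option String × List String × Bool → Option String × List String × Bool
  | [], st => st
  | l :: rest, (title, remaining, found) =>
    let line := PySem.Str.strip l
    if !found && line != "" then
      if decide (PySem.Str.len line < 100) &&
         !(PySem.Str.endswith line "." || PySem.Str.endswith line "," ||
           PySem.Str.endswith line ";" || PySem.Str.endswith line ":") then
        aLoop rest (some line, remaining, true)       -- title found; `continue`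
      else if found then aLoop rest (title, remaining ++ [line], found)
      else aLoop rest (title, remaining, found)
    else if found then aLoop rest (title, remaining ++ [line], found)
    else aLoop rest (title, remaining, found)

def format_with_title_py (text : String) : String :=
  if text = "" ∨ PySem.Str.strip text = "" then text  -- `if not text or not text.strip()`
  else
    let lines := (PySem.Str.split? text "\n").getD [] -- sep "\n" ≠ "", so split? is `some` here
    if lines = [] then text
    else
      match aLoop lines (none, [], false) with
      | (title, remaining, _) =>
        match title with
        | some t =>
          if t != "" then                             -- `if title:` (truthiness)
            PySem.Str.strip ("**" ++ t ++ "**\n\n" ++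
              (if remaining != [] then PySem.Str.join "\n" remaining else ""))
          else text
        | none => text

-- ===== PORT B =====
-- the title test `line and len(line) < 100 and not line.endswith((...))`
def pvTitleLike (line : List Char) : Bool :=
  decide (line ≠ []) && decide (PySem.Chars.len line < 100) &&
  !(PySem.Chars.endswith line ['.'] || PySem.Chars.endswith line [','] ||
    PySem.Chars.endswith line [';'] || PySem.Chars.endswith line [':'])

-- B's inner body loop: peel tail one line at a time with find/slice, collecting parts
def bParts (tail : List Char) : List (List Char) :=
  let k := PySem.Chars.find tail ['\n']
  if k < 0 then [PySem.Chars.strip tail]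
  else PySem.Chars.strip (tail.take k.toNat) :: bParts (tail.drop (k.toNat + 1))
termination_by tail.length
decreasing_by
  rename_i hk
  have h0 : (0 : Int) ≤ PySem.Chars.find tail ['\n'] := by omega
  have hin : ['\n'] <:+: tail := (PySem.Chars.find_nonneg_iff _ _).mp h0
  have h1 : 1 ≤ tail.length := by simpa using hin.sublist.length_le
  simp only [List.length_drop]
  omega

-- B's outer scan loop over the raw string (orig = the closed-over `text`)
def bScan (rest : List Char) (orig : String) : String :=
  let j := PySem.Chars.find rest ['\n']
  let head := if j < 0 then rest else rest.take j.toNat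
  let line := PySem.Chars.strip head
  if pvTitleLike line then
    String.ofList (PySem.Chars.strip
      (['*','*'] ++ line ++ ['*','*','\n','\n'] ++
       (if j < 0 then [] else PySem.Chars.join ['\n'] (bParts (rest.drop (j.toNat + 1))))))
  else if j < 0 then orig
  else bScan (rest.drop (j.toNat + 1)) orig
termination_by rest.length
decreasing_by
  rename_i hk
  have h0 : (0 : Int) ≤ PySem.Chars.find rest ['\n'] := by omega
  have hin : ['\n'] <:+: rest := (PySem.Chars.find_nonneg_iff _ _).mp h0
  have h1 : 1 ≤ rest.length := by simpa using hin.sublist.length_le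
  simp only [List.length_drop]
  omega

def format_with_title_py_alt (text : String) : String :=
  if text = "" ∨ PySem.Str.strip text = "" then text  -- same leading guard as the Python B
  else bScan text.toList text

-- ===== PRECONDITION & SPEC =====
def Spec_format_with_title_py (text : String) (out : String) : Prop := out = format_with_title_py_alt text
instance (text : String) (out : String) : Decidable (Spec_format_with_title_py text out) := by unfold Spec_format_with_title_py; infer_instance

-- ===== CLAIM (what is proved, stated in full; the proofs are below) =====
def Claim_equal_format_with_title_py : Prop := ∀ (text : String), Dom_format_with_title_py text → Spec_format_with_title_py text (format_with_title_py text)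

-- ===== LEMMAS AND PROOFS =====

-- reference: lines of a character list (= Python's text.split('\n'))
def mySplit : List Char → List (List Char)
  | [] => [[]]
  | c :: rest => if c = '\n' then [] :: mySplit rest else (mySplit rest).modifyHead (c :: ·)

-- reference: index of the first title-like stripped line
def firstIdxC : List (List Char) → Option Nat
  | [] => none
  | l :: rest => if pvTitleLike l then some 0 else (firstIdxC rest).map (· + 1)

-- splitOn.go with enough fuel computes mySplit
theorem splitOn_go_eq (fuel : Nat) : ∀ (l cur : List Char) (acc : List (List Char)),
    l.length < fuel →
    PySem.Chars.splitOn.go ['\n'] fuel l cur acc =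
      acc.reverse ++ (mySplit l).modifyHead (cur.reverse ++ ·) := by
  induction fuel with
  | zero => intro l cur acc h; omega
  | succ fuel ih =>
    intro l cur acc h
    cases l with
    | nil => simp [PySem.Chars.splitOn.go, mySplit]
    | cons c rest =>
      by_cases hc : c = '\n'
      · subst hc
        have hpre : List.isPrefixOf ['\n'] ('\n' :: rest) = true := by
          simp [List.isPrefixOf]
        simp only [PySem.Chars.splitOn.go, hpre, if_pos]
        rw [show List.drop ['\n'].length ('\n' :: rest) = rest from rfl]
        rw [ih rest [] (cur.reverse :: acc) (by simpa using Nat.lt_of_succ_lt_succ h)]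
        have hid : List.modifyHead (fun x : List Char => x) (mySplit rest) = mySplit rest := by
          cases mySplit rest <;> rfl
        simp [mySplit, hid]
      · have hpre : List.isPrefixOf ['\n'] (c :: rest) = false := by
          simp [List.isPrefixOf, Ne.symm hc]
        simp only [PySem.Chars.splitOn.go, hpre, Bool.false_eq_true, if_false]
        rw [ih rest (c :: cur) acc (by simpa using Nat.lt_of_succ_lt_succ h)]
        simp [mySplit, hc, List.modifyHead_modifyHead, Function.comp_def]

theorem splitOn_newline (cs : List Char) :
    PySem.Chars.splitOn cs ['\n'] = mySplit cs := by
  unfold PySem.Chars.splitOn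
  rw [splitOn_go_eq (cs.length + 1) cs [] [] (by omega)]
  cases h : mySplit cs <;> simp

theorem mySplit_ne_nil (cs : List Char) : mySplit cs ≠ [] := by
  induction cs with
  | nil => simp [mySplit]
  | cons c rest ih =>
    simp only [mySplit]
    split
    · simp
    · cases h : mySplit rest with
      | nil => exact absurd h ih
      | cons a b => simp

theorem mySplit_no_newline (cs : List Char) (h : '\n' ∉ cs) : mySplit cs = [cs] := by
  induction cs with
  | nil => rfl
  | cons c rest ih =>
    have hc : c ≠ '\n' := fun hc => h (hc ▸ List.mem_cons_self)
    simp only [mySplit, hc, if_false]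
    rw [ih (fun hm => h (List.mem_cons_of_mem _ hm))]
    rfl

theorem mySplit_append (pre suf : List Char) (h : '\n' ∉ pre) :
    mySplit (pre ++ '\n' :: suf) = pre :: mySplit suf := by
  induction pre with
  | nil => simp [mySplit]
  | cons c p ih =>
    have hc : c ≠ '\n' := fun hc => h (hc ▸ List.mem_cons_self)
    simp only [List.cons_append, mySplit, hc, if_false]
    rw [ih (fun hm => h (List.mem_cons_of_mem _ hm))]
    rfl

-- first occurrence decomposition
theorem exists_first_newline (cs : List Char) (h : '\n' ∈ cs) :
    ∃ pre suf, cs = pre ++ '\n' :: suf ∧ '\n' ∉ pre := by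
  induction cs with
  | nil => simp at h
  | cons c rest ih =>
    by_cases hc : c = '\n'
    · exact ⟨[], rest, by simp [hc], by simp⟩
    · obtain ⟨pre, suf, heq, hpre⟩ := ih (by
        rcases List.mem_cons.mp h with h' | h'
        · exact absurd h'.symm hc
        · exact h')
      exact ⟨c :: pre, suf, by simp [heq], by simp [hpre, Ne.symm hc]⟩

theorem find_newline_neg (cs : List Char) (h : '\n' ∉ cs) :
    PySem.Chars.find cs ['\n'] = -1 := by
  rw [PySem.Chars.find_eq_neg_one_iff]
  intro hin
  exact h (hin.sublist.subset List.mem_cons_self)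

theorem find_newline_at (pre suf : List Char) (h : '\n' ∉ pre) :
    PySem.Chars.find (pre ++ '\n' :: suf) ['\n'] = pre.length := by
  have hin : ['\n'] <:+: pre ++ '\n' :: suf := ⟨pre, suf, by simp⟩
  have h0 : (0 : Int) ≤ PySem.Chars.find (pre ++ '\n' :: suf) ['\n'] :=
    (PySem.Chars.find_nonneg_iff _ _).mpr hin
  obtain ⟨hp, hmin⟩ := PySem.Chars.find_spec h0
  set j := (PySem.Chars.find (pre ++ '\n' :: suf) ['\n']).toNat with hj
  have hle : PySem.Chars.find (pre ++ '\n' :: suf) ['\n'] ≤ (pre ++ '\n' :: suf).length :=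
    PySem.Chars.find_le_length _ _
  -- j cannot be < pre.length: the char there is in pre, hence not '\n'
  have hnlt : ¬ j < pre.length := by
    intro hlt
    obtain ⟨t, ht⟩ := hp
    have hget : (List.drop j (pre ++ '\n' :: suf))[0]? = some '\n' := by
      rw [← ht]; simp
    rw [List.getElem?_drop] at hget
    have hj0 : (pre ++ '\n' :: suf)[j + 0]? = pre[j]? := by
      simp only [Nat.add_zero]
      rw [List.getElem?_append_left (by omega)]
    rw [hj0] at hget
    have : '\n' ∈ pre := List.mem_of_getElem? hget
    exact h this
  -- j cannot be > pre.length: prefix holds at pre.length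
  have hngt : ¬ pre.length < j := by
    intro hlt
    exact hmin pre.length hlt ⟨suf, by simp⟩
  have : j = pre.length := by omega
  omega

-- B's inner loop strips every line of tail
theorem bParts_eq (tail : List Char) :
    bParts tail = (mySplit tail).map PySem.Chars.strip := by
  by_cases hmem : '\n' ∈ tail
  · obtain ⟨pre, suf, rfl, hpre⟩ := exists_first_newline tail hmem
    have hf := find_newline_at pre suf hpre
    rw [bParts, hf]
    have hneg : ¬ ((pre.length : Int) < 0) := by omega
    rw [if_neg hneg]
    simp only [Int.toNat_natCast, List.take_left, mySplit_append pre suf hpre]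
    have hdrop : (pre ++ '\n' :: suf).drop (pre.length + 1) = suf := by
      rw [← List.drop_drop]
      simp
    rw [hdrop, bParts_eq suf, List.map_cons]
  · rw [bParts, find_newline_neg tail hmem, mySplit_no_newline tail hmem]
    norm_num
termination_by tail.length
decreasing_by
  rename_i teq
  subst teq
  simp only [List.length_append, List.length_cons]
  omega

-- the index firstIdxC finds is in range and title-like
theorem firstIdxC_some (ls : List (List Char)) (i : Nat) (h : firstIdxC ls = some i) :
    pvTitleLike (ls.getD i []) = true := by
  induction ls generalizing i with
  | nil => simp [firstIdxC] at h
  | cons l rest ih =>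
    simp only [firstIdxC] at h
    by_cases hb : pvTitleLike l = true
    · simp [hb] at h; subst h; simpa [List.getD] using hb
    · rw [if_neg hb] at h
      cases hj : firstIdxC rest with
      | none => simp [hj] at h
      | some j =>
        simp [hj] at h
        subst h
        simpa [List.getD] using ih j hj

-- B's outer loop = locate-first-title-index over the stripped lines of mySplit
theorem bScan_eq (rest : List Char) (orig : String) :
    bScan rest orig =
      match firstIdxC ((mySplit rest).map PySem.Chars.strip) with
      | none => orig
      | some i =>
        String.ofList (PySem.Chars.strip
          (['*','*'] ++ ((mySplit rest).map PySem.Chars.strip).getD i [] ++ ['*','*','\n','\n'] ++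
           PySem.Chars.join ['\n'] (((mySplit rest).map PySem.Chars.strip).drop (i + 1)))) := by
  by_cases hmem : '\n' ∈ rest
  · obtain ⟨pre, suf, rfl, hpre⟩ := exists_first_newline rest hmem
    have hf := find_newline_at pre suf hpre
    have hneg : ¬ ((pre.length : Int) < 0) := by omega
    have hdrop : (pre ++ '\n' :: suf).drop (pre.length + 1) = suf := by
      rw [← List.drop_drop]; simp
    rw [bScan]
    simp only [hf, hneg, if_false, Int.toNat_natCast, List.take_left, hdrop,
      mySplit_append pre suf hpre, List.map_cons]
    by_cases ht : pvTitleLike (PySem.Chars.strip pre) = true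
    · simp only [ht, if_true, firstIdxC, bParts_eq suf]
      simp only [List.getD_cons_zero, List.drop_succ_cons, List.drop_zero]
    · simp only [ht, Bool.false_eq_true, if_false, firstIdxC]
      rw [bScan_eq suf orig]
      cases h : firstIdxC ((mySplit suf).map PySem.Chars.strip) with
      | none => simp
      | some j => simp
  · have hf := find_newline_neg rest hmem
    rw [bScan]
    simp only [hf, mySplit_no_newline rest hmem, List.map_cons,
      List.map_nil, firstIdxC]
    by_cases ht : pvTitleLike (PySem.Chars.strip rest) = true
    · simp [ht]
    · simp [ht]
termination_by rest.length
decreasing_by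
  rename_i teq
  subst teq
  simp only [List.length_append, List.length_cons]
  omega

-- ------- A-side: the stateful loop is the same locate-then-slice (from the String side) -------

-- the String-side title test used by A
def bIsTitle (l : String) : Bool :=
  l != "" && decide (PySem.Str.len l < 100) &&
  !(PySem.Str.endswith l "." || PySem.Str.endswith l "," ||
    PySem.Str.endswith l ";" || PySem.Str.endswith l ":")

def bFirstIdx : List String → Option Nat
  | [] => none
  | l :: rest => if bIsTitle l then some 0 else (bFirstIdx rest).map (· + 1)

-- once the title is found, A appends every further stripped line
theorem aLoop_found (ls : List String) (t : Option String) (rem : List String) :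
    aLoop ls (t, rem, true) = (t, rem ++ ls.map PySem.Str.strip, true) := by
  induction ls generalizing rem with
  | nil => simp [aLoop]
  | cons l rest ih => simp [aLoop, ih]

-- when the title-test succeeds, A stores the title and switches to the accumulating phase
theorem aLoop_cons_title (l : String) (rest : List String) (rem : List String)
    (h : bIsTitle (PySem.Str.strip l) = true) :
    aLoop (l :: rest) (none, rem, false) = aLoop rest (some (PySem.Str.strip l), rem, true) := by
  unfold bIsTitle at h
  simp only [Bool.and_eq_true] at h
  simp only [aLoop, Bool.not_false, Bool.true_and, h.1.1, h.1.2, h.2]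
  simp

-- when the title-test fails before a title was found, A drops the line
theorem aLoop_cons_skip (l : String) (rest : List String) (rem : List String)
    (h : bIsTitle (PySem.Str.strip l) = false) :
    aLoop (l :: rest) (none, rem, false) = aLoop rest (none, rem, false) := by
  unfold bIsTitle at h
  cases hsl : (PySem.Str.strip l != "") with
  | false => simp only [aLoop, Bool.not_false, Bool.true_and, hsl]; simp
  | true =>
    simp only [hsl, Bool.true_and] at h
    simp only [aLoop, Bool.not_false, Bool.true_and, hsl, h]
    simp

-- A's scanning phase = locate-then-slice
theorem aLoop_scan (ls : List String) (rem : List String) :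
    aLoop ls (none, rem, false) =
      match bFirstIdx (ls.map PySem.Str.strip) with
      | none => (none, rem, false)
      | some i => (some ((ls.map PySem.Str.strip).getD i ""),
                   rem ++ (ls.map PySem.Str.strip).drop (i + 1), true) := by
  induction ls with
  | nil => rfl
  | cons l rest ih =>
    by_cases hb : bIsTitle (PySem.Str.strip l) = true
    · rw [aLoop_cons_title _ _ _ hb, aLoop_found]
      simp [bFirstIdx, hb]
    · have hbf : bIsTitle (PySem.Str.strip l) = false := by simpa using hb
      rw [aLoop_cons_skip _ _ _ hbf, ih]
      simp only [List.map_cons, bFirstIdx, hbf]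
      cases h : bFirstIdx (rest.map PySem.Str.strip) with
      | none => simp
      | some j => simp

-- ------- bridges between the String side (A) and the Chars side (B) -------

theorem strip_ofList (l : List Char) :
    PySem.Str.strip (String.ofList l) = String.ofList (PySem.Chars.strip l) := by
  rw [← String.toList_inj]
  simp [PySem.Str.toList_strip]

theorem bIsTitle_ofList (l : List Char) : bIsTitle (String.ofList l) = pvTitleLike l := by
  unfold bIsTitle pvTitleLike
  have hne : (String.ofList l != "") = decide (l ≠ []) := by
    rcases l with _ | ⟨c, t⟩
    · simp
    · have : String.ofList (c :: t) ≠ "" := by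
        intro h
        have := congrArg String.toList h
        simp at this
      simp [this]
  rw [hne]
  have hlen : PySem.Str.len (String.ofList l) = PySem.Chars.len l := by
    simp [PySem.Str.len_eq, PySem.Chars.len_eq]
  rw [hlen]
  simp [PySem.Str.endswith_eq]

theorem bFirstIdx_map_ofList (L : List (List Char)) :
    bFirstIdx (L.map String.ofList) = firstIdxC L := by
  induction L with
  | nil => rfl
  | cons l rest ih =>
    simp only [List.map_cons, bFirstIdx, firstIdxC, bIsTitle_ofList, ih]

theorem if_join_eq (rem : List String) :
    (if rem != [] then PySem.Str.join "\n" rem else "") = PySem.Str.join "\n" rem := by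
  cases rem with
  | nil => rfl
  | cons a b => rfl

theorem getD_map_ofList (L : List (List Char)) (i : Nat) :
    (L.map String.ofList).getD i "" = String.ofList (L.getD i []) := by
  have : ("" : String) = String.ofList [] := rfl
  rw [this, List.getD_map]

-- ===== VERDICT (by name: the statement is the Claim_ definition above) =====
theorem format_with_title_py_spec : Claim_equal_format_with_title_py := by
  intro text _
  unfold Spec_format_with_title_py format_with_title_py format_with_title_py_alt
  by_cases hg : text = "" ∨ PySem.Str.strip text = ""
  · rw [if_pos hg, if_pos hg]
  · rw [if_neg hg, if_neg hg]
    have hlines : (PySem.Str.split? text "\n").getD [] =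
        (mySplit text.toList).map String.ofList := by
      simp [PySem.Str.split?, PySem.Chars.split?, splitOn_newline]
    rw [hlines]
    have hnil : (mySplit text.toList).map String.ofList ≠ [] := by
      simp [mySplit_ne_nil]
    rw [if_neg hnil]
    rw [aLoop_scan _ [], bScan_eq]
    have hmap : ((mySplit text.toList).map String.ofList).map PySem.Str.strip =
        ((mySplit text.toList).map PySem.Chars.strip).map String.ofList := by
      simp only [List.map_map]
      exact List.map_congr_left (fun l _ => strip_ofList l)
    rw [hmap, bFirstIdx_map_ofList]
    cases h : firstIdxC ((mySplit text.toList).map PySem.Chars.strip) with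
    | none => rfl
    | some i =>
      dsimp only
      set S := (mySplit text.toList).map PySem.Chars.strip with hS
      have htl := firstIdxC_some S i h
      rw [getD_map_ofList]
      have hne : (String.ofList (S.getD i []) != "") = true := by
        rw [bne_iff_ne]
        intro hcontra
        have h0 : S.getD i [] = [] := by
          have := congrArg String.toList hcontra
          simpa using this
        rw [h0] at htl
        simp [pvTitleLike] at htl
      rw [if_pos hne]
      simp only [List.nil_append, ← List.map_drop, if_join_eq]
      rw [← String.toList_inj]
      simp [PySem.Str.toList_strip, PySem.Str.toList_join, List.map_map,
        Function.comp_def, String.toList_append]
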